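-- pv_equiv track=rewrite | github.com/liamonpulsesolutions/exit-ready-snapshot | src/agents/scoring_agent.py | generate_quick_actions
-- ===== SOURCE A (Python) =====
-- def generate_quick_actions(category, score_data, responses):
--     """Generate specific quick actions based on category and gaps"""
--
--     actions = []
--     gaps = score_data.get('gaps', [])
--
--     if category == 'owner_dependence':
--         if any('certification' in gap for gap in gaps):
--             actions.append("Schedule certification training for senior team member")
--         if any('approval' in gap for gap in gaps):
--             actions.append("Create approval matrix delegating decisions under $50K")
--         if any('client' in gap for gap in gaps):
--             actions.append("Begin introducing senior team to key clients")
--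
--     elif category == 'revenue_quality':
--         if any('concentration' in gap for gap in gaps):
--             actions.append("Develop plan to acquire 3 new major clients")
--         if any('month-to-month' in gap for gap in gaps):
--             actions.append("Convert top 5 clients to annual contracts")
--         if not any('contract' in str(responses.get('q3', '')).lower() for gap in gaps):
--             actions.append("Implement formal service agreements")
--
--     elif category == 'financial_readiness':
--         if any('confidence' in gap for gap in gaps):
--             actions.append("Engage CPA for financial cleanup project")
--         if any('not tracked' in gap for gap in gaps):
--             actions.append("Implement monthly P&L reviews")
--
--     elif category == 'operational_resilience':
--         if any('documentation' in gap for gap in gaps):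
--             actions.append("Document top 5 critical processes using templates")
--         if any('key person' in gap for gap in gaps):
--             actions.append("Create succession plan for key employee")
--
--     elif category == 'growth_value':
--         if any('quantification' in gap for gap in gaps):
--             actions.append("Quantify and document all competitive advantages")
--         if any('No clear' in gap for gap in gaps):
--             actions.append("Conduct competitive analysis to identify unique value")
--
--     # Default actions if none specific
--     if not actions:
--         actions = [
--             f"Address top gap: {gaps[0]}" if gaps else f"Improve {category}",
--             "Schedule consultation to develop improvement plan"
--         ]
--
--     return actions[:3]  # Return top 3 actions
-- ===== SOURCE B (Python) =====
-- KEYWORDS = ["certification", "approval", "client", "concentration",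
--             "month-to-month", "confidence", "not tracked", "documentation",
--             "key person", "quantification", "No clear"]
--
-- RULES = {
--     'owner_dependence': [
--         ("certification", "Schedule certification training for senior team member"),
--         ("approval", "Create approval matrix delegating decisions under $50K"),
--         ("client", "Begin introducing senior team to key clients"),
--     ],
--     'revenue_quality': [
--         ("concentration", "Develop plan to acquire 3 new major clients"),
--         ("month-to-month", "Convert top 5 clients to annual contracts"),
--     ],
--     'financial_readiness': [
--         ("confidence", "Engage CPA for financial cleanup project"),
--         ("not tracked", "Implement monthly P&L reviews"),
--     ],
--     'operational_resilience': [
--         ("documentation", "Document top 5 critical processes using templates"),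
--         ("key person", "Create succession plan for key employee"),
--     ],
--     'growth_value': [
--         ("quantification", "Quantify and document all competitive advantages"),
--         ("No clear", "Conduct competitive analysis to identify unique value"),
--     ],
-- }
--
--
-- def generate_quick_actions(category, score_data, responses):
--     gaps = score_data.get('gaps', [])
--     # One pass over the gaps: index every keyword that occurs in any gap.
--     hits = set()
--     for gap in gaps:
--         for kw in KEYWORDS:
--             if kw in gap:
--                 hits.add(kw)
--     actions = [act for kw, act in RULES.get(category, []) if kw in hits]
--     # The service-agreement item is not a gap-keyword rule: it fires whenever
--     # there are no gaps, or q3 does not mention a contract.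
--     if category == 'revenue_quality' and (
--             not gaps or 'contract' not in str(responses.get('q3', '')).lower()):
--         actions.append("Implement formal service agreements")
--     if not actions:
--         actions = ["Address top gap: %s" % gaps[0] if gaps else "Improve %s" % category,
--                    "Schedule consultation to develop improvement plan"]
--     return actions[:3]
-- ===== Notes on version B (the rewrite author's own statement) =====
-- stated objective: alternative
-- what changed: Inverts the traversal: instead of A's per-keyword any()-scans over the gaps inside five branch blocks, B makes one gap-major pass building a hit-set of all keywords occurring in any gap, then emits the category's actions by set membership, with the non-keyword service-agreement rule handled as its own condition on q3.
import Mathlib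
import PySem

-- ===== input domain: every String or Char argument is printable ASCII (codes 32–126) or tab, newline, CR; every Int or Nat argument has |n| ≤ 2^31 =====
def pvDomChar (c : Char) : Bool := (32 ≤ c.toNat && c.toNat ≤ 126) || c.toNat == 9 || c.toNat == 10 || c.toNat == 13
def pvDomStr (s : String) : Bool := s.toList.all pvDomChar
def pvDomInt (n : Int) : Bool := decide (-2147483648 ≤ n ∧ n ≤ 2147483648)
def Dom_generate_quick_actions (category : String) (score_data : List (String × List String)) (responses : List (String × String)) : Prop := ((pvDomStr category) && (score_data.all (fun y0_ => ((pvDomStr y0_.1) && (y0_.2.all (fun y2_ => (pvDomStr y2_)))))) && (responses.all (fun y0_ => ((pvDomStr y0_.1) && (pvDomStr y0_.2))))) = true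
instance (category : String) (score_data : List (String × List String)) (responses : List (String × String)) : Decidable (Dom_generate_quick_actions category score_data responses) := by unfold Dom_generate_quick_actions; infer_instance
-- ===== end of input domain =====

-- B inverts the traversal: one gap-major pass builds a hit-set of keywords found in any gap,
-- then the category's actions are emitted by set membership (objective: alternative).

-- ===== PORT A =====
def generate_quick_actions (category : String) (score_data : List (String × List String)) (responses : List (String × String)) : List String :=
  let gaps := PySem.Dict.getD (PySem.Dict.mk score_data) "gaps" []
  let actions : List String :=
    if category = "owner_dependence" then
      (if gaps.any (fun gap => PySem.Str.isIn "certification" gap) then ["Schedule certification training for senior team member"] else []) ++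
      (if gaps.any (fun gap => PySem.Str.isIn "approval" gap) then ["Create approval matrix delegating decisions under $50K"] else []) ++
      (if gaps.any (fun gap => PySem.Str.isIn "client" gap) then ["Begin introducing senior team to key clients"] else [])
    else if category = "revenue_quality" then
      (if gaps.any (fun gap => PySem.Str.isIn "concentration" gap) then ["Develop plan to acquire 3 new major clients"] else []) ++
      (if gaps.any (fun gap => PySem.Str.isIn "month-to-month" gap) then ["Convert top 5 clients to annual contracts"] else []) ++
      (if !(gaps.any (fun _ => PySem.Str.isIn "contract" (PySem.Str.lower (PySem.Dict.getD (PySem.Dict.mk responses) "q3" "")))) then ["Implement formal service agreements"] else [])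
    else if category = "financial_readiness" then
      (if gaps.any (fun gap => PySem.Str.isIn "confidence" gap) then ["Engage CPA for financial cleanup project"] else []) ++
      (if gaps.any (fun gap => PySem.Str.isIn "not tracked" gap) then ["Implement monthly P&L reviews"] else [])
    else if category = "operational_resilience" then
      (if gaps.any (fun gap => PySem.Str.isIn "documentation" gap) then ["Document top 5 critical processes using templates"] else []) ++
      (if gaps.any (fun gap => PySem.Str.isIn "key person" gap) then ["Create succession plan for key employee"] else [])
    else if category = "growth_value" then
      (if gaps.any (fun gap => PySem.Str.isIn "quantification" gap) then ["Quantify and document all competitive advantages"] else []) ++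
      (if gaps.any (fun gap => PySem.Str.isIn "No clear" gap) then ["Conduct competitive analysis to identify unique value"] else [])
    else []
  let actions :=
    if actions = [] then
      [(match gaps with | g :: _ => "Address top gap: " ++ g | [] => "Improve " ++ category),
       "Schedule consultation to develop improvement plan"]
    else actions
  PySem.List.slice actions none (some 3)

-- ===== PORT B =====
def pvKeywords : List String :=
  ["certification", "approval", "client", "concentration", "month-to-month",
   "confidence", "not tracked", "documentation", "key person", "quantification", "No clear"]

def pvRules : List (String × List (String × String)) :=
  [("owner_dependence",
     [("certification", "Schedule certification training for senior team member"),
      ("approval", "Create approval matrix delegating decisions under $50K"),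
      ("client", "Begin introducing senior team to key clients")]),
   ("revenue_quality",
     [("concentration", "Develop plan to acquire 3 new major clients"),
      ("month-to-month", "Convert top 5 clients to annual contracts")]),
   ("financial_readiness",
     [("confidence", "Engage CPA for financial cleanup project"),
      ("not tracked", "Implement monthly P&L reviews")]),
   ("operational_resilience",
     [("documentation", "Document top 5 critical processes using templates"),
      ("key person", "Create succession plan for key employee")]),
   ("growth_value",
     [("quantification", "Quantify and document all competitive advantages"),
      ("No clear", "Conduct competitive analysis to identify unique value")])]

def generate_quick_actions_alt (category : String) (score_data : List (String × List String)) (responses : List (String × String)) : List String :=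
  let gaps := PySem.Dict.getD (PySem.Dict.mk score_data) "gaps" []
  let hits : PySem.Set String :=
    gaps.foldl (fun s gap =>
      pvKeywords.foldl (fun s kw => if PySem.Str.isIn kw gap then PySem.Set.add s kw else s) s)
      PySem.Set.empty
  let actions :=
    ((PySem.Dict.getD (PySem.Dict.mk pvRules) category []).filter
      (fun r => PySem.Set.contains hits r.1)).map (fun r => r.2)
  let actions :=
    if category = "revenue_quality" &&
       (gaps.isEmpty || !PySem.Str.isIn "contract" (PySem.Str.lower (PySem.Dict.getD (PySem.Dict.mk responses) "q3" ""))) then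
      actions ++ ["Implement formal service agreements"]
    else actions
  let actions :=
    if actions = [] then
      [(match gaps with | g :: _ => "Address top gap: " ++ g | [] => "Improve " ++ category),
       "Schedule consultation to develop improvement plan"]
    else actions
  PySem.List.slice actions none (some 3)

-- ===== PRECONDITION & SPEC =====
def Spec_generate_quick_actions (category : String) (score_data : List (String × List String)) (responses : List (String × String)) (out : List String) : Prop := out = generate_quick_actions_alt category score_data responses
instance (category : String) (score_data : List (String × List String)) (responses : List (String × String)) (out : List String) : Decidable (Spec_generate_quick_actions category score_data responses out) := by unfold Spec_generate_quick_actions; infer_instance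

-- ===== CLAIM =====
def Claim_equal_generate_quick_actions : Prop := ∀ (category : String) (score_data : List (String × List String)) (responses : List (String × String)), Dom_generate_quick_actions category score_data responses → Spec_generate_quick_actions category score_data responses (generate_quick_actions category score_data responses)

-- ===== LEMMAS AND PROOFS =====

-- Inner pass of B's hit-set builder: scanning one gap against a keyword list.
theorem pv_mem_inner (p : String → String → Bool) (gap : String) (kws : List String)
    (s : PySem.Set String) (k : String) :
    (k ∈ kws.foldl (fun s kw => if p kw gap then PySem.Set.add s kw else s) s) ↔
      k ∈ s ∨ (k ∈ kws ∧ p k gap = true) := by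
  induction kws generalizing s with
  | nil => simp
  | cons kw rest ih =>
    simp only [List.foldl_cons, List.mem_cons]
    by_cases h : p kw gap = true
    · rw [if_pos h, ih]
      simp only [PySem.Set.mem_add]
      constructor
      · rintro ((hs | rfl) | ⟨hr, hk⟩)
        · exact Or.inl hs
        · exact Or.inr ⟨Or.inl rfl, h⟩
        · exact Or.inr ⟨Or.inr hr, hk⟩
      · rintro (hs | ⟨rfl | hr, hk⟩)
        · exact Or.inl (Or.inl hs)
        · exact Or.inl (Or.inr rfl)
        · exact Or.inr ⟨hr, hk⟩
    · rw [if_neg h, ih]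
      constructor
      · rintro (hs | ⟨hr, hk⟩)
        · exact Or.inl hs
        · exact Or.inr ⟨Or.inr hr, hk⟩
      · rintro (hs | ⟨rfl | hr, hk⟩)
        · exact Or.inl hs
        · exact absurd hk h
        · exact Or.inr ⟨hr, hk⟩

-- B's hit-set contains exactly the keywords occurring in some gap.
theorem pv_mem_hits (p : String → String → Bool) (gaps : List String)
    (s : PySem.Set String) (k : String) :
    (k ∈ gaps.foldl (fun s gap =>
        pvKeywords.foldl (fun s kw => if p kw gap then PySem.Set.add s kw else s) s) s) ↔
      k ∈ s ∨ (k ∈ pvKeywords ∧ gaps.any (fun gap => p k gap) = true) := by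
  induction gaps generalizing s with
  | nil => simp
  | cons g rest ih =>
    simp only [List.foldl_cons, ih, pv_mem_inner, List.any_cons, Bool.or_eq_true]
    tauto

-- Membership test on the hit-set, as a Bool, for a keyword of the table.
theorem pv_contains_hits (p : String → String → Bool) (gaps : List String) (k : String)
    (hk : k ∈ pvKeywords) :
    PySem.Set.contains
      (gaps.foldl (fun s gap =>
        pvKeywords.foldl (fun s kw => if p kw gap then PySem.Set.add s kw else s) s)
        PySem.Set.empty) k = gaps.any (fun gap => p k gap) := by
  cases h : gaps.any (fun gap => p k gap) with
  | false =>
    rw [Bool.eq_false_iff]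
    intro hc
    rcases (pv_mem_hits p gaps PySem.Set.empty k).mp ((PySem.Set.contains_iff _ _).mp hc) with
      hm | ⟨_, hm⟩
    · simp [PySem.Set.empty] at hm
    · rw [h] at hm; exact Bool.false_ne_true hm
  | true =>
    exact (PySem.Set.contains_iff _ _).mpr
      ((pv_mem_hits p gaps PySem.Set.empty k).mpr (Or.inr ⟨hk, h⟩))

-- `not any (const c)` over a list is `isEmpty || !c` (A's third revenue_quality branch).
theorem pv_not_any_const (gaps : List String) (c : Bool) :
    (!(gaps.any (fun _ => c))) = (gaps.isEmpty || !c) := by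
  cases gaps <;> cases c <;> simp [List.any]

-- B's filtered rule table, with the hit-set test resolved, is A's per-category action chain
-- (without the non-keyword service-agreement rule).
set_option maxRecDepth 8192 in
theorem pv_B_actions (category : String) (gaps : List String) :
    List.map (fun r => r.2) (List.filter
      (fun r => PySem.Set.contains
        (gaps.foldl (fun s gap =>
          pvKeywords.foldl (fun s kw => if PySem.Str.isIn kw gap then PySem.Set.add s kw else s) s)
          PySem.Set.empty) r.1)
      (PySem.Dict.getD (PySem.Dict.mk pvRules) category [])) =
    (if category = "owner_dependence" then
      (if gaps.any (fun gap => PySem.Str.isIn "certification" gap) then ["Schedule certification training for senior team member"] else []) ++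
      (if gaps.any (fun gap => PySem.Str.isIn "approval" gap) then ["Create approval matrix delegating decisions under $50K"] else []) ++
      (if gaps.any (fun gap => PySem.Str.isIn "client" gap) then ["Begin introducing senior team to key clients"] else [])
    else if category = "revenue_quality" then
      (if gaps.any (fun gap => PySem.Str.isIn "concentration" gap) then ["Develop plan to acquire 3 new major clients"] else []) ++
      (if gaps.any (fun gap => PySem.Str.isIn "month-to-month" gap) then ["Convert top 5 clients to annual contracts"] else [])
    else if category = "financial_readiness" then
      (if gaps.any (fun gap => PySem.Str.isIn "confidence" gap) then ["Engage CPA for financial cleanup project"] else []) ++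
      (if gaps.any (fun gap => PySem.Str.isIn "not tracked" gap) then ["Implement monthly P&L reviews"] else [])
    else if category = "operational_resilience" then
      (if gaps.any (fun gap => PySem.Str.isIn "documentation" gap) then ["Document top 5 critical processes using templates"] else []) ++
      (if gaps.any (fun gap => PySem.Str.isIn "key person" gap) then ["Create succession plan for key employee"] else [])
    else if category = "growth_value" then
      (if gaps.any (fun gap => PySem.Str.isIn "quantification" gap) then ["Quantify and document all competitive advantages"] else []) ++
      (if gaps.any (fun gap => PySem.Str.isIn "No clear" gap) then ["Conduct competitive analysis to identify unique value"] else [])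
    else []) := by
  by_cases h1 : category = "owner_dependence"
  · rw [h1, show PySem.Dict.getD (PySem.Dict.mk pvRules) "owner_dependence" ([] : List (String × String)) =
      [("certification", "Schedule certification training for senior team member"),
       ("approval", "Create approval matrix delegating decisions under $50K"),
       ("client", "Begin introducing senior team to key clients")] from rfl]
    simp only [List.filter_cons, List.filter_nil,
      pv_contains_hits PySem.Str.isIn gaps "certification" (by simp [pvKeywords]),
      pv_contains_hits PySem.Str.isIn gaps "approval" (by simp [pvKeywords]),
      pv_contains_hits PySem.Str.isIn gaps "client" (by simp [pvKeywords])]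
    split_ifs <;> simp_all
  · by_cases h2 : category = "revenue_quality"
    · rw [h2, show PySem.Dict.getD (PySem.Dict.mk pvRules) "revenue_quality" ([] : List (String × String)) =
        [("concentration", "Develop plan to acquire 3 new major clients"),
         ("month-to-month", "Convert top 5 clients to annual contracts")] from rfl]
      simp only [List.filter_cons, List.filter_nil,
        pv_contains_hits PySem.Str.isIn gaps "concentration" (by simp [pvKeywords]),
        pv_contains_hits PySem.Str.isIn gaps "month-to-month" (by simp [pvKeywords])]
      split_ifs <;> simp_all
    · by_cases h3 : category = "financial_readiness"
      · rw [h3, show PySem.Dict.getD (PySem.Dict.mk pvRules) "financial_readiness" ([] : List (String × String)) =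
          [("confidence", "Engage CPA for financial cleanup project"),
           ("not tracked", "Implement monthly P&L reviews")] from rfl]
        simp only [List.filter_cons, List.filter_nil,
          pv_contains_hits PySem.Str.isIn gaps "confidence" (by simp [pvKeywords]),
          pv_contains_hits PySem.Str.isIn gaps "not tracked" (by simp [pvKeywords])]
        split_ifs <;> simp_all
      · by_cases h4 : category = "operational_resilience"
        · rw [h4, show PySem.Dict.getD (PySem.Dict.mk pvRules) "operational_resilience" ([] : List (String × String)) =
            [("documentation", "Document top 5 critical processes using templates"),
             ("key person", "Create succession plan for key employee")] from rfl]
          simp only [List.filter_cons, List.filter_nil,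
            pv_contains_hits PySem.Str.isIn gaps "documentation" (by simp [pvKeywords]),
            pv_contains_hits PySem.Str.isIn gaps "key person" (by simp [pvKeywords])]
          split_ifs <;> simp_all
        · by_cases h5 : category = "growth_value"
          · rw [h5, show PySem.Dict.getD (PySem.Dict.mk pvRules) "growth_value" ([] : List (String × String)) =
              [("quantification", "Quantify and document all competitive advantages"),
               ("No clear", "Conduct competitive analysis to identify unique value")] from rfl]
            simp only [List.filter_cons, List.filter_nil,
              pv_contains_hits PySem.Str.isIn gaps "quantification" (by simp [pvKeywords]),
              pv_contains_hits PySem.Str.isIn gaps "No clear" (by simp [pvKeywords])]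
            split_ifs <;> simp_all
          · have hf : List.find? (fun p => p.1 == category) pvRules = none := by
              rw [List.find?_eq_none]
              simp only [pvRules, List.mem_cons, List.not_mem_nil, or_false, beq_iff_eq]
              rintro p (rfl | rfl | rfl | rfl | rfl) <;> simp_all [eq_comm]
            simp [PySem.Dict.getD, PySem.Dict.get?, hf, h1, h2, h3, h4, h5]

-- ===== VERDICT =====
set_option maxRecDepth 8192 in
set_option maxHeartbeats 1000000 in
theorem generate_quick_actions_spec : Claim_equal_generate_quick_actions := by
  intro category score_data responses _
  unfold Spec_generate_quick_actions generate_quick_actions generate_quick_actions_alt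
  set gaps := PySem.Dict.getD (PySem.Dict.mk score_data) "gaps" ([] : List String) with hgaps
  simp only [pv_not_any_const]
  rw [pv_B_actions category gaps]
  by_cases h1 : category = "owner_dependence" <;>
  by_cases h2 : category = "revenue_quality" <;>
  by_cases h3 : category = "financial_readiness" <;>
  by_cases h4 : category = "operational_resilience" <;>
  by_cases h5 : category = "growth_value" <;>
  simp only [h1, h2, h3, h4, h5, if_pos, String.reduceEq, decide_true, decide_false,
    Bool.true_and, Bool.false_and, if_false] <;>
  split_ifs <;> simp_all
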